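-- pv_equiv track=rewrite | github.com/PERSONA-bench/PERSONA | 3.3PromptMaker.py | count_qualifying_dialogue_trees
-- ===== SOURCE A (Python) =====
-- from collections import deque
--
-- def count_qualifying_dialogue_trees(all_nodes_in_post, post_author_name):
--     if not all_nodes_in_post: return 0
--     post_node = all_nodes_in_post[0]
--     if post_node.get('type') != 'post': return 0
--     nodes_map = {node['id']: node for node in all_nodes_in_post}
--     top_level_comment_ids = [node['id'] for node in all_nodes_in_post
--                              if node.get('type') == 'comment' and node.get('parent_id') == post_node['id']]
--     tree_count = 0
--     for tlc_id in top_level_comment_ids: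
--         author_participated_in_thread = False
--         q_thread_nodes = deque()
--         # Find the tlc_node object to start BFS
--         tlc_node_obj = nodes_map.get(tlc_id)
--         if not tlc_node_obj: continue
--         q_thread_nodes.append(tlc_node_obj)  # Add the actual node object
--
--         visited_in_thread_check = {tlc_id}  # Store IDs of visited nodes
--
--         while q_thread_nodes:
--             current_node_in_thread = q_thread_nodes.popleft()
--             if not current_node_in_thread: continue
--             if current_node_in_thread.get('author') == post_author_name:
--                 author_participated_in_thread = True
--                 break
--
--             current_node_id_for_replies = current_node_in_thread.get('id')
--             for node_in_map in all_nodes_in_post:  # Check all nodes in the post for replies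
--                 if node_in_map.get('parent_id') == current_node_id_for_replies and \
--                         node_in_map['id'] not in visited_in_thread_check:
--                     # Get the actual node object from nodes_map to append
--                     reply_node_obj = nodes_map.get(node_in_map['id'])
--                     if reply_node_obj:
--                         q_thread_nodes.append(reply_node_obj)
--                     visited_in_thread_check.add(node_in_map['id'])
--
--         if author_participated_in_thread:
--             has_replies_to_tlc = any(node.get('parent_id') == tlc_id for node in nodes_map.values())
--             if has_replies_to_tlc:
--                 tree_count += 1
--     return tree_count
-- ===== SOURCE B (Python) =====
-- from collections import deque
--
-- def count_qualifying_dialogue_trees(all_nodes_in_post, post_author_name):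
--     if not all_nodes_in_post:
--         return 0
--     post_node = all_nodes_in_post[0]
--     if post_node.get('type') != 'post':
--         return 0
--     post_id = post_node['id']
--     # One pass: index children by parent_id and remember each node's author.
--     children = {}
--     authors = {}
--     for node in all_nodes_in_post:
--         nid = node['id']
--         authors[nid] = node.get('author')
--         pid = node.get('parent_id')
--         if pid is not None:
--             children.setdefault(pid, []).append(nid)
--     tree_count = 0
--     for node in all_nodes_in_post:
--         if node.get('type') == 'comment' and node.get('parent_id') == post_id:
--             tlc_id = node['id']
--             if not children.get(tlc_id):
--                 continue  # no replies: thread cannot qualify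
--             queue = deque([tlc_id])
--             seen = {tlc_id}
--             found = False
--             while queue:
--                 cur = queue.popleft()
--                 if authors.get(cur) == post_author_name:
--                     found = True
--                     break
--                 for ch in children.get(cur, []):
--                     if ch not in seen:
--                         seen.add(ch)
--                         queue.append(ch)
--             if found:
--                 tree_count += 1
--     return tree_count
-- ===== Notes on version B (the rewrite author's own statement) =====
-- stated objective: alternative
-- what changed: B builds a parent_id->children index and an id->author map in one pass and runs each thread's BFS over that index, replacing A's per-BFS-step rescan of the whole node list and its per-thread any() scan for replies; Pre_ excludes lists with duplicate node ids (there A's last-wins dict reinsertion and deduplicated values() view are accidental) and lists where a node lacks an 'id' key (KeyError in both).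
import Mathlib
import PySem

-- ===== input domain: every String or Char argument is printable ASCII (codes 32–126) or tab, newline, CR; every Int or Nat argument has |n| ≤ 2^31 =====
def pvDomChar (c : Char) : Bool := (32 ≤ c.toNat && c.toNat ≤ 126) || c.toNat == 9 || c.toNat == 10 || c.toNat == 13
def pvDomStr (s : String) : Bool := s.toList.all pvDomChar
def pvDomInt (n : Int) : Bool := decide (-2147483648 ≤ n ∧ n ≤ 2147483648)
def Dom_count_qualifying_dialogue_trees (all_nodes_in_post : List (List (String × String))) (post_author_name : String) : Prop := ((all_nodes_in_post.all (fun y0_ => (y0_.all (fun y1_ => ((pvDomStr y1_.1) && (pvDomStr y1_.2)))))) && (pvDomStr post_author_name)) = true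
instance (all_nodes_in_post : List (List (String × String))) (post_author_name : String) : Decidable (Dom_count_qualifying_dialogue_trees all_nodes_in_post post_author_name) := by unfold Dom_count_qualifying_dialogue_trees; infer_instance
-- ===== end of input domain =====

-- B replaces A's per-BFS-step rescan of the whole node list by a parent_id->children index and an
-- id->author map built once (objective: alternative traversal of the same data). Equivalence is
-- claimed on inputs with distinct node ids, each node carrying an 'id' key (see Pre_).

-- shared dict-on-a-node helpers (a Python node dict is a List (String × String))
def pvGet (n : List (String × String)) (k : String) : Option String := (PySem.Dict.mk n).get? k

-- node['id'] (KeyError when absent — excluded by Pre_; the default "" is never reached under Pre_)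
def pvId (n : List (String × String)) : String := (pvGet n "id").getD ""

-- ===== PORT A =====
-- nodes_map = {node['id']: node for node in all_nodes_in_post}
def pvNodesMap (all : List (List (String × String))) : PySem.Dict String (List (String × String)) :=
  all.foldl (fun m n => m.insert (pvId n) n) PySem.Dict.empty

-- A's inner BFS loop (deque + visited set), fuel-bounded: each iteration pops one queue element and
-- the total number of pops is at most 1 + (number of ids ever added to visited) ≤ all.length + 1,
-- so fuel = all.length + 1 makes the recursion total without changing any reachable result.
-- 'nodes_map.get(id)' returning None and returning {} are both falsy in Python; the port conflates
-- them via getD [] — both skip the append, exactly as Python does.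
def pvBfsA (all : List (List (String × String))) (nodes_map : PySem.Dict String (List (String × String)))
    (name : String) : Nat → List (List (String × String)) → PySem.Set String → Bool
  | 0, _, _ => false
  | _ + 1, [], _ => false
  | fuel + 1, cur :: q, visited =>
    if cur == [] then pvBfsA all nodes_map name fuel q visited  -- 'if not current_node_in_thread: continue'
    else if pvGet cur "author" == some name then true
    else
      let curId := pvGet cur "id"
      let st := all.foldl
        (fun (st : List (List (String × String)) × PySem.Set String) n =>
          if pvGet n "parent_id" == curId && !(PySem.Set.contains st.2 (pvId n)) then
            ((let r := nodes_map.getD (pvId n) []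
              if r == [] then st.1 else st.1 ++ [r]),
             PySem.Set.add st.2 (pvId n))
          else st) (q, visited)
      pvBfsA all nodes_map name fuel st.1 st.2

def count_qualifying_dialogue_trees (all_nodes_in_post : List (List (String × String))) (post_author_name : String) : Int :=
  match all_nodes_in_post with
  | [] => 0
  | post :: _ =>
    if !(pvGet post "type" == some "post") then 0
    else
      let nodes_map := pvNodesMap all_nodes_in_post
      let postId := pvId post
      let tlcs := (all_nodes_in_post.filter
        (fun n => pvGet n "type" == some "comment" && pvGet n "parent_id" == some postId)).map pvId
      tlcs.foldl (fun cnt tlc =>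
        let obj := nodes_map.getD tlc []   -- None and {} are both falsy: 'if not tlc_node_obj: continue'
        if obj == [] then cnt
        else
          let participated := pvBfsA all_nodes_in_post nodes_map post_author_name
            (all_nodes_in_post.length + 1) [obj] (PySem.Set.add PySem.Set.empty tlc)
          if participated &&
             (nodes_map.values.any (fun n => pvGet n "parent_id" == some tlc)) then cnt + 1 else cnt) 0

-- ===== PORT B =====
-- one pass: children[parent_id] (setdefault/append = Dict.modify with default []) and authors[id]
def pvIndexB (all : List (List (String × String))) :
    PySem.Dict String (List String) × PySem.Dict String (Option String) :=
  all.foldl (fun p n =>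
    let nid := pvId n
    let a2 := p.2.insert nid (pvGet n "author")
    match pvGet n "parent_id" with
    | some pid => (p.1.modify pid [] (· ++ [nid]), a2)
    | none => (p.1, a2)) (PySem.Dict.empty, PySem.Dict.empty)

-- B's BFS over the precomputed index (same fuel bound as A's, for the same reason)
def pvBfsB (children : PySem.Dict String (List String)) (authors : PySem.Dict String (Option String))
    (name : String) : Nat → List String → PySem.Set String → Bool
  | 0, _, _ => false
  | _ + 1, [], _ => false
  | fuel + 1, cur :: q, seen =>
    if authors.getD cur none == some name then true
    else
      let st := (children.getD cur []).foldl
        (fun (st : List String × PySem.Set String) ch =>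
          if !(PySem.Set.contains st.2 ch) then (st.1 ++ [ch], PySem.Set.add st.2 ch) else st) (q, seen)
      pvBfsB children authors name fuel st.1 st.2

def count_qualifying_dialogue_trees_alt (all_nodes_in_post : List (List (String × String))) (post_author_name : String) : Int :=
  match all_nodes_in_post with
  | [] => 0
  | post :: _ =>
    if !(pvGet post "type" == some "post") then 0
    else
      let idx := pvIndexB all_nodes_in_post
      let postId := pvId post
      all_nodes_in_post.foldl (fun cnt n =>
        if pvGet n "type" == some "comment" && pvGet n "parent_id" == some postId then
          let tlc := pvId n
          if idx.1.getD tlc [] == [] then cnt   -- no replies: cannot qualify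
          else if pvBfsB idx.1 idx.2 post_author_name
            (all_nodes_in_post.length + 1) [tlc] (PySem.Set.add PySem.Set.empty tlc)
          then cnt + 1 else cnt
        else cnt) 0

-- ===== PRECONDITION & SPEC =====
-- Pre_ excludes (when the first node has type 'post', the only case where A touches the ids):
-- nodes without an 'id' key, on which A raises KeyError, and duplicate node ids, on which A's
-- last-wins dict reinsertion and deduplicated values() view are accidental dict-key behaviour.
def Pre_count_qualifying_dialogue_trees (all_nodes_in_post : List (List (String × String))) (post_author_name : String) : Prop :=
  pvGet (all_nodes_in_post.headD []) "type" = some "post" →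
    ((∀ n ∈ all_nodes_in_post, (pvGet n "id").isSome = true) ∧ (all_nodes_in_post.map pvId).Nodup)
instance (all_nodes_in_post : List (List (String × String))) (post_author_name : String) : Decidable (Pre_count_qualifying_dialogue_trees all_nodes_in_post post_author_name) := by unfold Pre_count_qualifying_dialogue_trees; infer_instance

def pvWitness_count_qualifying_dialogue_trees : (List (List (String × String))) × String :=
  ([[("id", "p"), ("type", "post")],
    [("id", "c"), ("type", "comment"), ("parent_id", "p"), ("author", "a")],
    [("id", "r"), ("parent_id", "c"), ("author", "z")]], "a")

def Spec_count_qualifying_dialogue_trees (all_nodes_in_post : List (List (String × String))) (post_author_name : String) (out : Int) : Prop := out = count_qualifying_dialogue_trees_alt all_nodes_in_post post_author_name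
instance (all_nodes_in_post : List (List (String × String))) (post_author_name : String) (out : Int) : Decidable (Spec_count_qualifying_dialogue_trees all_nodes_in_post post_author_name out) := by unfold Spec_count_qualifying_dialogue_trees; infer_instance

-- ===== CLAIM (what is proved, stated in full; the proofs are below) =====
def Claim_equal_count_qualifying_dialogue_trees : Prop := ∀ (all_nodes_in_post : List (List (String × String))) (post_author_name : String), Dom_count_qualifying_dialogue_trees all_nodes_in_post post_author_name → Pre_count_qualifying_dialogue_trees all_nodes_in_post post_author_name → Spec_count_qualifying_dialogue_trees all_nodes_in_post post_author_name (count_qualifying_dialogue_trees all_nodes_in_post post_author_name)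

-- ===== LEMMAS AND PROOFS =====

-- the unique node of `all` carrying id i (under Nodup ids), as A's nodes_map resolves it
def pvFindNode (all : List (List (String × String))) (i : String) : List (String × String) :=
  (all.find? (fun m => pvId m == i)).getD []

-- generic: a foldl over the same list with two step functions preserving a relation
theorem pvFoldRel {γ σ τ : Type} (l : List γ) (f : σ → γ → σ) (g : τ → γ → τ) (R : σ → τ → Prop)
    (s : σ) (t : τ) (hR : R s t) (hstep : ∀ s t x, x ∈ l → R s t → R (f s x) (g t x)) :
    R (l.foldl f s) (l.foldl g t) := by
  induction l generalizing s t with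
  | nil => exact hR
  | cons a l ih =>
    exact ih _ _ (hstep s t a (by simp) hR) (fun s t x hx => hstep s t x (by simp [hx]))

theorem pv_get?_foldl_insert {γ ν : Type} (key : γ → String) (v : γ → ν)
    (l : List γ) (d : PySem.Dict String ν) (k : String) :
    (l.foldl (fun d x => d.insert (key x) (v x)) d).get? k =
      match l.reverse.find? (fun x => key x == k) with
      | some x => some (v x)
      | none => d.get? k := by
  induction l using List.reverseRecOn generalizing d with
  | nil => simp
  | append_singleton l x ih =>
    rw [List.foldl_append]
    simp only [List.foldl_cons, List.foldl_nil, List.reverse_append, List.reverse_singleton,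
      List.singleton_append, List.find?_cons]
    by_cases h : key x = k
    · subst h; simp [PySem.Dict.get?_insert_self]
    · have : (key x == k) = false := by simp [h]
      rw [this]
      rw [PySem.Dict.get?_insert_of_ne _ _ (fun hk => h hk.symm)]
      exact ih d

-- L2: with Nodup keys, reverse find = find

theorem pv_find_reverse_of_nodup {γ : Type} (key : γ → String) (l : List γ) (k : String)
    (hnd : (l.map key).Nodup) :
    l.reverse.find? (fun x => key x == k) = l.find? (fun x => key x == k) := by
  induction l with
  | nil => simp
  | cons a t ih =>
    simp only [List.map_cons, List.nodup_cons] at hnd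
    obtain ⟨hna, hnt⟩ := hnd
    simp only [List.reverse_cons, List.find?_append, List.find?_cons]
    by_cases h : key a = k
    · have ht : t.find? (fun x => key x == k) = none := by
        rw [List.find?_eq_none]
        intro x hx hkx
        exact hna (by rw [← h] at hkx; simp at hkx; rw [← hkx]; exact List.mem_map_of_mem hx)
      have htr : t.reverse.find? (fun x => key x == k) = none := by
        rw [List.find?_eq_none] at ht ⊢
        intro x hx; exact ht x (List.mem_reverse.mp hx)
      simp [htr, ht, h]
    · have : (key a == k) = false := by simp [h]
      simp only [this, ih hnt, cond_false]
      cases ht : t.find? (fun x => key x == k) <;> simp [ht]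


-- L3: find the element itself

theorem pv_find_id_self (all : List (List (String × String))) (n : List (String × String))
    (hnd : (all.map pvId).Nodup) (hn : n ∈ all) :
    all.find? (fun m => pvId m == pvId n) = some n := by
  induction all with
  | nil => cases hn
  | cons a t ih =>
    simp only [List.map_cons, List.nodup_cons] at hnd
    obtain ⟨hna, hnt⟩ := hnd
    rcases List.mem_cons.mp hn with rfl | hn
    · simp [List.find?_cons]
    · have : (pvId a == pvId n) = false := by
        simp only [beq_eq_false_iff_ne, ne_eq]
        intro h; exact hna (h ▸ List.mem_map_of_mem hn)
      simp [List.find?_cons, this, ih hnt hn]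

theorem pv_mem_ne_nil (n : List (String × String)) (h : (pvGet n "id").isSome = true) : n ≠ [] := by
  intro hn; subst hn; simp [pvGet, PySem.Dict.get?] at h

theorem pv_id_some (n : List (String × String)) (h : (pvGet n "id").isSome = true) :
    pvGet n "id" = some (pvId n) := by
  cases hg : pvGet n "id" with
  | none => rw [hg] at h; simp at h
  | some v => simp [pvId, hg]


theorem pv_indexB_snd (l : List (List (String × String)))
    (p : PySem.Dict String (List String) × PySem.Dict String (Option String)) :
    (l.foldl (fun p n =>
      let nid := pvId n
      let a2 := p.2.insert nid (pvGet n "author")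
      match pvGet n "parent_id" with
      | some pid => (p.1.modify pid [] (· ++ [nid]), a2)
      | none => (p.1, a2)) p).2 =
    l.foldl (fun d n => d.insert (pvId n) (pvGet n "author")) p.2 := by
  induction l generalizing p with
  | nil => rfl
  | cons a t ih =>
    simp only [List.foldl_cons]
    cases h : pvGet a "parent_id" <;> simp only [h] <;> exact ih _

theorem pv_indexB_fst (l : List (List (String × String)))
    (p : PySem.Dict String (List String) × PySem.Dict String (Option String)) :
    (l.foldl (fun p n =>
      let nid := pvId n
      let a2 := p.2.insert nid (pvGet n "author")
      match pvGet n "parent_id" with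
      | some pid => (p.1.modify pid [] (· ++ [nid]), a2)
      | none => (p.1, a2)) p).1 =
    (l.filterMap (fun n => (pvGet n "parent_id").map (fun pid => (pid, pvId n)))).foldl
      (fun d q => d.modify q.1 [] (· ++ [q.2])) p.1 := by
  induction l generalizing p with
  | nil => rfl
  | cons a t ih =>
    simp only [List.foldl_cons, List.filterMap_cons]
    cases h : pvGet a "parent_id" <;> simp only [h, Option.map_none, Option.map_some] <;>
      [exact ih _; (simp only [List.foldl_cons]; exact ih _)]

theorem pv_filter_filterMap (all : List (List (String × String))) (c : String) :
    (((all.filterMap (fun n => (pvGet n "parent_id").map (fun pid => (pid, pvId n)))).filter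
        (fun q => q.1 == c)).map (fun q => q.2)) =
    (all.filter (fun n => pvGet n "parent_id" == some c)).map pvId := by
  induction all with
  | nil => rfl
  | cons a t ih =>
    simp only [List.filterMap_cons, List.filter_cons]
    cases h : pvGet a "parent_id" with
    | none => simp [h, ih]
    | some pid =>
      by_cases hc : pid = c
      · subst hc; simp [List.filter_cons, ih]
      · have h1 : (pid == c) = false := by simp [hc]
        have h2 : (some pid == some c) = false := by simp [hc]
        simp [List.filter_cons, h1, h2, ih]

theorem pv_children_getD (all : List (List (String × String))) (c : String) :
    (pvIndexB all).1.getD c [] = (all.filter (fun n => pvGet n "parent_id" == some c)).map pvId := by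
  show ((all.foldl _ (PySem.Dict.empty, PySem.Dict.empty)).1 : PySem.Dict String (List String)).getD c [] = _
  rw [pv_indexB_fst]
  rw [PySem.Dict.getD_foldl_modify_append]
  rw [PySem.Dict.getD_empty]
  simpa using pv_filter_filterMap all c

theorem pv_nodesMap_get? (all : List (List (String × String))) (hnd : (all.map pvId).Nodup)
    (n : List (String × String)) (hn : n ∈ all) :
    (pvNodesMap all).get? (pvId n) = some n := by
  unfold pvNodesMap
  rw [pv_get?_foldl_insert pvId (fun x => x)]
  rw [pv_find_reverse_of_nodup pvId all (pvId n) hnd]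
  rw [pv_find_id_self all n hnd hn]

theorem pv_authors_get? (all : List (List (String × String))) (hnd : (all.map pvId).Nodup)
    (n : List (String × String)) (hn : n ∈ all) :
    (pvIndexB all).2.get? (pvId n) = some (pvGet n "author") := by
  show ((all.foldl _ (PySem.Dict.empty, PySem.Dict.empty)).2 : PySem.Dict String (Option String)).get? (pvId n) = _
  rw [pv_indexB_snd]
  rw [pv_get?_foldl_insert pvId (fun x => pvGet x "author")]
  rw [pv_find_reverse_of_nodup pvId all (pvId n) hnd]
  rw [pv_find_id_self all n hnd hn]

theorem pv_nodesMap_values (all : List (List (String × String))) (hnd : (all.map pvId).Nodup) :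
    (pvNodesMap all).values = all := by
  unfold pvNodesMap
  have := PySem.Dict.items_foldl_insert_fresh all pvId (fun n => n) PySem.Dict.empty
    (fun a _ => by simp [PySem.Dict.contains_empty]) hnd
  simp only [PySem.Dict.values, this]
  have he : (PySem.Dict.empty : PySem.Dict String (List (String × String))).items = [] := rfl
  rw [he]
  simp [Function.comp_def]

-- state relation for the two BFS loops: A's queue of node objects is B's queue of ids resolved
-- through nodes_map, visited sets are identical, and every queued id belongs to some node
def pvRelSt (all : List (List (String × String)))
    (sA : List (List (String × String)) × PySem.Set String)
    (sB : List String × PySem.Set String) : Prop :=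
  sA.1 = sB.1.map (pvFindNode all) ∧ sA.2 = sB.2 ∧ (∀ i ∈ sB.1, ∃ n ∈ all, pvId n = i)

theorem pv_findNode_self (all : List (List (String × String))) (hnd : (all.map pvId).Nodup)
    (n : List (String × String)) (hn : n ∈ all) : pvFindNode all (pvId n) = n := by
  unfold pvFindNode
  rw [pv_find_id_self all n hnd hn]
  rfl

theorem pv_bfs_bisim (all : List (List (String × String))) (name : String)
    (hid : ∀ n ∈ all, (pvGet n "id").isSome = true) (hnd : (all.map pvId).Nodup) :
    ∀ (fuel : Nat) (qB : List String) (qA : List (List (String × String))) (vis : PySem.Set String),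
      qA = qB.map (pvFindNode all) → (∀ i ∈ qB, ∃ n ∈ all, pvId n = i) →
      pvBfsA all (pvNodesMap all) name fuel qA vis =
        pvBfsB (pvIndexB all).1 (pvIndexB all).2 name fuel qB vis := by
  intro fuel
  induction fuel with
  | zero => intro qB qA vis _ _; simp [pvBfsA, pvBfsB]
  | succ fuel ih =>
    intro qB qA vis hq hids
    cases qB with
    | nil => subst hq; simp [pvBfsA, pvBfsB]
    | cons cur q' =>
      obtain ⟨n0, hn0, hid0⟩ := hids cur (by simp)
      have hfind : pvFindNode all cur = n0 := by rw [← hid0]; exact pv_findNode_self all hnd n0 hn0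
      have hne : n0 ≠ [] := pv_mem_ne_nil n0 (hid n0 hn0)
      subst hq
      simp only [List.map_cons, pvBfsA, pvBfsB, hfind]
      have hbeq : (n0 == ([] : List (String × String))) = false := by
        simp [hne]
      rw [hbeq]
      simp only [Bool.false_eq_true, if_false]
      have hauth : (pvIndexB all).2.getD cur none = pvGet n0 "author" := by
        rw [PySem.Dict.getD_eq_get?_getD, ← hid0, pv_authors_get? all hnd n0 hn0]
        rfl
      rw [hauth]
      by_cases ha : (pvGet n0 "author" == some name) = true
      · rw [ha]; simp
      · rw [Bool.not_eq_true] at ha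
        rw [ha]
        simp only [Bool.false_eq_true, if_false]
        have hcurId : pvGet n0 "id" = some cur := by rw [pv_id_some n0 (hid n0 hn0), hid0]
        rw [hcurId]
        -- align B's fold list with a guarded fold over `all`
        rw [pv_children_getD all cur, List.foldl_map, List.foldl_filter]
        -- both folds preserve pvRelSt
        have hrel := pvFoldRel all
          (fun (st : List (List (String × String)) × PySem.Set String) n =>
            if pvGet n "parent_id" == some cur && !(PySem.Set.contains st.2 (pvId n)) then
              ((let r := (pvNodesMap all).getD (pvId n) []
                if r == [] then st.1 else st.1 ++ [r]),
               PySem.Set.add st.2 (pvId n))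
            else st)
          (fun (st : List String × PySem.Set String) n =>
            if (pvGet n "parent_id" == some cur) = true then
              if !(PySem.Set.contains st.2 (pvId n)) then (st.1 ++ [pvId n], PySem.Set.add st.2 (pvId n)) else st
            else st)
          (pvRelSt all) (q'.map (pvFindNode all), vis) (q', vis)
          ⟨rfl, rfl, fun i hi => hids i (by simp [hi])⟩
          ?_
        · obtain ⟨h1, h2, h3⟩ := hrel
          rw [h2]
          exact ih _ _ _ h1 h3
        · intro s t x hx ⟨hs1, hs2, hs3⟩
          by_cases hp : (pvGet x "parent_id" == some cur) = true
          · by_cases hc : PySem.Set.contains t.2 (pvId x) = true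
            · simp only [hp, hs2, hc, Bool.not_true, Bool.and_false, Bool.false_eq_true, if_false,
                if_true, Bool.not_eq_true]
              exact ⟨hs1, hs2, hs3⟩
            · rw [Bool.not_eq_true] at hc
              have hgd : (pvNodesMap all).getD (pvId x) [] = x := by
                rw [PySem.Dict.getD_eq_get?_getD, pv_nodesMap_get? all hnd x hx]
                rfl
              have hxne : (x == ([] : List (String × String))) = false := by
                simp [pv_mem_ne_nil x (hid x hx)]
              simp only [hp, hs2, hc, Bool.not_false, Bool.and_true, if_true, hgd, hxne,
                Bool.false_eq_true, if_false]
              refine ⟨?_, rfl, ?_⟩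
              · rw [hs1, List.map_append, List.map_singleton, pv_findNode_self all hnd x hx]
              · intro i hi
                rcases List.mem_append.mp hi with hi | hi
                · exact hs3 i hi
                · obtain rfl : i = pvId x := by simpa using hi
                  exact ⟨x, hx, rfl⟩
          · rw [Bool.not_eq_true] at hp
            simp only [hp, Bool.false_and, Bool.false_eq_true, if_false]
            exact ⟨hs1, hs2, hs3⟩


-- ===== VERDICT (by name: the statement is the Claim_ definition above) =====
theorem count_qualifying_dialogue_trees_spec : Claim_equal_count_qualifying_dialogue_trees := by
  intro all name _ hpre
  unfold Spec_count_qualifying_dialogue_trees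
  cases all with
  | nil => rfl
  | cons post rest =>
    by_cases hty : pvGet post "type" = some "post"
    · obtain ⟨hid, hnd⟩ := hpre (by simpa using hty)
      have hb : (pvGet post "type" == some "post") = true := by simp [hty]
      simp only [count_qualifying_dialogue_trees, count_qualifying_dialogue_trees_alt, hb,
        Bool.not_true, Bool.false_eq_true, if_false]
      rw [List.foldl_map, List.foldl_filter]
      refine pvFoldRel (post :: rest) _ _ (fun (a b : Int) => a = b) 0 0 rfl ?_
      intro s t x hx hst
      subst hst
      by_cases hg : (pvGet x "type" == some "comment" && pvGet x "parent_id" == some (pvId post)) = true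
      · simp only [hg, if_true]
        have hgd : (pvNodesMap (post :: rest)).getD (pvId x) [] = x := by
          rw [PySem.Dict.getD_eq_get?_getD, pv_nodesMap_get? (post :: rest) hnd x hx]; rfl
        have hxne : (x == ([] : List (String × String))) = false := by
          simp [pv_mem_ne_nil x (hid x hx)]
        simp only [hgd, hxne, Bool.false_eq_true, if_false]
        have hch := pv_children_getD (post :: rest) (pvId x)
        have hval := pv_nodesMap_values (post :: rest) hnd
        have hbfs := pv_bfs_bisim (post :: rest) name hid hnd ((post :: rest).length + 1)
          [pvId x] [x] (PySem.Set.add PySem.Set.empty (pvId x))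
          (by rw [List.map_singleton, pv_findNode_self (post :: rest) hnd x hx])
          (fun i hi => ⟨x, hx, (List.mem_singleton.mp hi).symm⟩)
        by_cases hemp : (post :: rest).filter (fun m => pvGet m "parent_id" == some (pvId x)) = []
        · have hcempty : ((pvIndexB (post :: rest)).1.getD (pvId x) [] == ([] : List String)) = true := by
            rw [hch, hemp]; rfl
          have hany : (pvNodesMap (post :: rest)).values.any
              (fun n => pvGet n "parent_id" == some (pvId x)) = false := by
            rw [hval]
            rw [List.any_eq_false]
            intro m hm
            intro hpm
            have : m ∈ (post :: rest).filter (fun m => pvGet m "parent_id" == some (pvId x)) :=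
              List.mem_filter.mpr ⟨hm, hpm⟩
            rw [hemp] at this
            cases this
          rw [hcempty]
          simp [hany]
        · have hcempty : ((pvIndexB (post :: rest)).1.getD (pvId x) [] == ([] : List String)) = false := by
            rw [hch]
            simpa using hemp
          have hany : (pvNodesMap (post :: rest)).values.any
              (fun n => pvGet n "parent_id" == some (pvId x)) = true := by
            rw [hval]
            rw [List.any_eq_true]
            obtain ⟨m, hm⟩ := List.exists_mem_of_ne_nil _ hemp
            obtain ⟨hm1, hm2⟩ := List.mem_filter.mp hm
            exact ⟨m, hm1, hm2⟩
          rw [hcempty]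
          simp only [Bool.false_eq_true, if_false]
          rw [hbfs, hany]
          simp
      · simp only [hg, Bool.false_eq_true, if_false]
    · have hf : (pvGet post "type" == some "post") = false := by simp [hty]
      simp [count_qualifying_dialogue_trees, count_qualifying_dialogue_trees_alt, hf]
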